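-- pv_equiv track=rewrite | github.com/MrBinit/AI-system-design | app/services/web_retrieval_service.py | _target_domain_coverage_count
-- ===== SOURCE A (Python) =====
-- def _domain_group_key(host: str) -> str:
--     normalized = str(host or "").strip().lower()
--     if normalized.startswith("www."):
--         normalized = normalized[4:]
--     if not normalized:
--         return ""
--     parts = [segment for segment in normalized.split(".") if segment]
--     if len(parts) <= 2:
--         return normalized
--     return ".".join(parts[-2:])
--
-- def _target_domain_coverage_count(unique_domains: list[str], target_domain_groups: list[str]) -> int:
--     if not target_domain_groups:
--         return 0
--     target_set = {str(item).strip().lower() for item in target_domain_groups if str(item).strip()}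
--     if not target_set:
--         return 0
--     count = 0
--     for domain in unique_domains:
--         grouped = _domain_group_key(str(domain))
--         if grouped in target_set:
--             count += 1
--     return count
-- ===== SOURCE B (Python) =====
-- def _domain_group_key(host: str) -> str:
--     normalized = str(host or "").strip().lower()
--     if normalized.startswith("www."):
--         normalized = normalized[4:]
--     if not normalized:
--         return ""
--     parts = [segment for segment in normalized.split(".") if segment]
--     if len(parts) <= 2:
--         return normalized
--     return ".".join(parts[-2:])
--
-- def _target_domain_coverage_count(unique_domains: list[str], target_domain_groups: list[str]) -> int:
--     targets = []
--     for item in target_domain_groups: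
--         t = str(item).strip().lower()
--         if t and t not in targets:
--             targets.append(t)
--     if not targets:
--         return 0
--     keys = [_domain_group_key(str(domain)) for domain in unique_domains]
--     total = 0
--     for t in targets:
--         total += keys.count(t)
--     return total
-- ===== Notes on version B (the rewrite author's own statement) =====
-- stated objective: alternative
-- what changed: B inverts the counting: instead of A's single scan over the domains testing each group key for membership in a normalized target set, B builds the deduplicated normalized target list with an append-if-new loop, maps every domain to its group key once, and returns the sum of keys.count(t) over the targets.
import Mathlib
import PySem

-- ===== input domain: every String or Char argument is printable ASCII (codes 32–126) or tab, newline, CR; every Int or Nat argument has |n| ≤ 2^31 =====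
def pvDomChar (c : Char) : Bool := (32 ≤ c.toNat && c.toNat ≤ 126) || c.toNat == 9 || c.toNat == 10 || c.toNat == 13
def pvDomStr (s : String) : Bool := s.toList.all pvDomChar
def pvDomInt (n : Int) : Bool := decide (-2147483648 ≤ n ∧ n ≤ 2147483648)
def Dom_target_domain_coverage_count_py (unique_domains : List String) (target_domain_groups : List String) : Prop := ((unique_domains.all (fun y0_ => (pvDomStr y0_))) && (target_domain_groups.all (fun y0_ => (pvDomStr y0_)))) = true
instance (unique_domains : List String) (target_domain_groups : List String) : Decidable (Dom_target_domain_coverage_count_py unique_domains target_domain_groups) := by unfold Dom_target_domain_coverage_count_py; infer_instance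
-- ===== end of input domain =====

-- B replaces A's membership-test scan over the domains by a per-target counting pass: it builds
-- the deduplicated normalized target list with an explicit append-if-new loop, maps every domain
-- to its group key once, and sums keys.count(t) over the targets (objective: alternative
-- decomposition, same result).

-- helper shared verbatim by both Pythons: _domain_group_key
def pvGroupKey (host : String) : String :=
  let normalized := PySem.Str.lower (PySem.Str.strip host)
  let normalized := if PySem.Str.startswith normalized "www." then PySem.Str.slice normalized (some 4) none else normalized
  if normalized = "" then ""
  else
    let parts := ((PySem.Str.split? normalized ".").getD []).filter (fun segment => segment ≠ "")
    if parts.length ≤ 2 then normalized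
    else PySem.Str.join "." (PySem.List.slice parts (some (-2)) none)

-- ===== PORT A =====
def target_domain_coverage_count_py (unique_domains : List String) (target_domain_groups : List String) : Int :=
  if target_domain_groups = [] then 0
  else
    let target_set := PySem.Set.ofList ((target_domain_groups.filter
      (fun item => PySem.Str.strip item ≠ "")).map (fun item => PySem.Str.lower (PySem.Str.strip item)))
    if target_set = [] then 0
    else
      unique_domains.foldl (fun count domain =>
        let grouped := pvGroupKey domain
        if PySem.Set.contains target_set grouped then count + 1 else count) 0

-- ===== PORT B =====
def target_domain_coverage_count_py_alt (unique_domains : List String) (target_domain_groups : List String) : Int :=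
  let targets := target_domain_groups.foldl (fun targets item =>
    let t := PySem.Str.lower (PySem.Str.strip item)
    if t ≠ "" ∧ ¬ targets.contains t then targets ++ [t] else targets) []
  if targets = [] then 0
  else
    let keys := unique_domains.map (fun domain => pvGroupKey domain)
    targets.foldl (fun total t => total + (PySem.List.count keys t : Int)) 0

-- ===== PRECONDITION & SPEC =====
def Spec_target_domain_coverage_count_py (unique_domains : List String) (target_domain_groups : List String) (out : Int) : Prop := out = target_domain_coverage_count_py_alt unique_domains target_domain_groups
instance (unique_domains : List String) (target_domain_groups : List String) (out : Int) : Decidable (Spec_target_domain_coverage_count_py unique_domains target_domain_groups out) := by unfold Spec_target_domain_coverage_count_py; infer_instance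

-- ===== CLAIM =====
def Claim_equal_target_domain_coverage_count_py : Prop := ∀ (unique_domains : List String) (target_domain_groups : List String), Dom_target_domain_coverage_count_py unique_domains target_domain_groups → Spec_target_domain_coverage_count_py unique_domains target_domain_groups (target_domain_coverage_count_py unique_domains target_domain_groups)

-- ===== LEMMAS AND PROOFS =====

-- lower never changes emptiness
lemma pv_lower_ne_empty (s : String) : (PySem.Str.lower s ≠ "") ↔ s ≠ "" := by
  constructor <;> intro h hc
  · subst hc; exact h rfl
  · have := congrArg String.toList hc
    simp [PySem.Str.toList_lower, PySem.Chars.lower] at this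
    exact h this

-- B's dedup-building loop over the raw targets is A's set comprehension
lemma pv_targets_loop (tg : List String) (s : PySem.Set String) :
    tg.foldl (fun targets item =>
        let t := PySem.Str.lower (PySem.Str.strip item)
        if t ≠ "" ∧ ¬ targets.contains t then targets ++ [t] else targets) s =
    ((tg.filter (fun item => PySem.Str.strip item ≠ "")).map
        (fun item => PySem.Str.lower (PySem.Str.strip item))).foldl PySem.Set.add s := by
  induction tg generalizing s with
  | nil => simp
  | cons item tg ih =>
    simp only [List.foldl_cons, List.filter_cons]
    by_cases hne : PySem.Str.strip item = ""
    · have ht : PySem.Str.lower (PySem.Str.strip item) = "" := by rw [hne]; rfl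
      rw [if_neg (by simp [ht]), if_neg (by simp [hne])]
      exact ih s
    · have ht : PySem.Str.lower (PySem.Str.strip item) ≠ "" := (pv_lower_ne_empty _).mpr hne
      conv_rhs => rw [if_pos (show (decide (PySem.Str.strip item ≠ "")) = true by simp [hne])]
      rw [List.map_cons, List.foldl_cons, ← ih]
      split
      · next h =>
        have : PySem.Set.add s (PySem.Str.lower (PySem.Str.strip item))
            = s ++ [PySem.Str.lower (PySem.Str.strip item)] := by
          simp only [PySem.Set.add]
          rw [if_neg (by simpa using h.2)]
        rw [this]
      · next h =>
        have hc : s.contains (PySem.Str.lower (PySem.Str.strip item)) = true := by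
          rcases not_and_or.mp h with h1 | h2
          · exact absurd ht (by simpa using h1)
          · simpa using h2
        have : PySem.Set.add s (PySem.Str.lower (PySem.Str.strip item)) = s := by
          simp only [PySem.Set.add]
          rw [if_pos hc]
        rw [this]

-- sum of the equality indicator over S is S.count k
lemma pv_sum_indicator (S : List String) (k : String) :
    (S.map (fun t => if k == t then (1 : Nat) else 0)).sum = S.count k := by
  induction S with
  | nil => simp
  | cons t S ih =>
    simp only [List.map_cons, List.sum_cons, ih, List.count_cons]
    by_cases h : k = t
    · simp [h, Nat.add_comm]
    · have h' : ¬t = k := fun hc => h hc.symm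
      simp [h, h']

-- pushing the Nat cast out of a mapped sum
lemma pv_cast_sum (S : List String) (f : String → Nat) :
    (S.map (fun t => (f t : Int))).sum = ((S.map f).sum : Int) := by
  induction S with
  | nil => simp
  | cons a S ih => simp [ih]

-- main: for a Nodup target list, summing per-target counts equals counting keys in the set
lemma pv_main (ks S : List String) (h : S.Nodup) :
    (S.map (fun t => ks.count t)).sum = ks.countP (fun k => decide (k ∈ S)) := by
  induction ks with
  | nil => simp
  | cons k ks ih =>
    simp only [List.count_cons]
    rw [List.sum_map_add, pv_sum_indicator, ih, List.countP_cons]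
    by_cases hk : k ∈ S
    · simp [hk, List.count_eq_one_of_mem h hk]
    · simp [hk, List.count_eq_zero_of_not_mem hk]

-- ===== VERDICT =====
theorem target_domain_coverage_count_py_spec : Claim_equal_target_domain_coverage_count_py := by
  intro ud tg _
  unfold Spec_target_domain_coverage_count_py target_domain_coverage_count_py target_domain_coverage_count_py_alt
  have hloop := pv_targets_loop tg []
  rw [← PySem.Set.ofList_eq_foldl] at hloop
  simp only [hloop]
  set S := PySem.Set.ofList ((tg.filter (fun item => PySem.Str.strip item ≠ "")).map
      (fun item => PySem.Str.lower (PySem.Str.strip item))) with hSdef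
  by_cases h2 : S = []
  · by_cases h1 : tg = [] <;> simp [h1, h2]
  · have h1 : tg ≠ [] := by
      intro hc; subst hc
      simp [hSdef, PySem.Set.ofList] at h2
    rw [if_neg h1, if_neg h2, if_neg h2]
    have hS : S.Nodup := PySem.Set.nodup_ofList _
    rw [PySem.List.foldl_if_add_one (fun domain => PySem.Set.contains S (pvGroupKey domain)),
        PySem.List.foldl_add S (fun t => (PySem.List.count (ud.map (fun d => pvGroupKey d)) t : Int))]
    simp only [PySem.List.count_eq, zero_add]
    rw [pv_cast_sum, pv_main _ _ hS]
    congr 1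
    rw [List.countP_map]
    apply List.countP_congr
    intro domain _
    simp [PySem.Set.contains, Function.comp]
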